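-- pv_equiv track=rewrite | github.com/yunzhuuuuu/fox-bot | eye.py | eye_with_position
-- ===== SOURCE A (Python) =====
-- def eye_with_position(x, y):
--
--     eye = [
--         [0, 0, 0, 0, 0, 0, 0, 0],
--         [0, 0, 0, 0, 0, 0, 0, 0],
--         [0, 0, 0, 0, 0, 0, 0, 0],
--         [0, 0, 0, 0, 0, 0, 0, 0],
--         [0, 0, 0, 0, 0, 0, 0, 0],
--         [0, 0, 0, 0, 0, 0, 0, 0],
--         [0, 0, 0, 0, 0, 0, 0, 0],
--         [0, 0, 0, 0, 0, 0, 0, 0],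
--     ]
--
--     for row in range(8):
--         if row == y or row == y + 4:  # first and last rows (3 pixels)
--             for col in range(8):
--                 if col > x and col < x + 4:
--                     eye[row][col] = 1
--         elif row > y and row < y + 4:  # middle rows (5 pixels)
--             for col in range(8):
--                 if col >= x and col <= x + 4:
--                     eye[row][col] = 1
--
--     return eye
-- ===== SOURCE B (Python) =====
-- OFFSETS = [
--     (0, 1), (0, 2), (0, 3),
--     (1, 0), (1, 1), (1, 2), (1, 3), (1, 4),
--     (2, 0), (2, 1), (2, 2), (2, 3), (2, 4),
--     (3, 0), (3, 1), (3, 2), (3, 3), (3, 4),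
--     (4, 1), (4, 2), (4, 3),
-- ]
--
--
-- def eye_with_position(x, y):
--     eye = [[0] * 8 for _ in range(8)]
--     for dr, dc in OFFSETS:
--         r = y + dr
--         c = x + dc
--         if 0 <= r < 8 and 0 <= c < 8:
--             eye[r][c] = 1
--     return eye
-- ===== Notes on version B (the rewrite author's own statement) =====
-- stated objective: alternative
-- what changed: B replaces A's scan over all 64 grid cells with row/column range tests by a single loop over the 21 fixed pixel offsets of the eye shape, setting each in-bounds pixel directly.
import Mathlib
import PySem

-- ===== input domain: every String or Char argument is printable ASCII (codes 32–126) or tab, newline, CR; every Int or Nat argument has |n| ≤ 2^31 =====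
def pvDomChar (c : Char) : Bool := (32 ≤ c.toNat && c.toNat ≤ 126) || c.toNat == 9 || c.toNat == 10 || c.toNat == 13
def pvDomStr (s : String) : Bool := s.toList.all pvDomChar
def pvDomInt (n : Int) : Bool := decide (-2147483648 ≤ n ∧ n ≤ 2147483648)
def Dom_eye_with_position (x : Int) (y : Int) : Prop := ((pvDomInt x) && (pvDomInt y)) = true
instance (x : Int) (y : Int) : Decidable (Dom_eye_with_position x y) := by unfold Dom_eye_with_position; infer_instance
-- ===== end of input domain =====

-- B replaces A's scan-all-64-cells double loop by iterating over the 21 fixed shape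
-- offsets and setting only in-bounds pixels (alternative decomposition, same cost class).

-- ===== PORT A =====
-- the literal 8x8 zero grid A starts from
def pvZeros8 : List (List Int) :=
  [[0, 0, 0, 0, 0, 0, 0, 0],
   [0, 0, 0, 0, 0, 0, 0, 0],
   [0, 0, 0, 0, 0, 0, 0, 0],
   [0, 0, 0, 0, 0, 0, 0, 0],
   [0, 0, 0, 0, 0, 0, 0, 0],
   [0, 0, 0, 0, 0, 0, 0, 0],
   [0, 0, 0, 0, 0, 0, 0, 0],
   [0, 0, 0, 0, 0, 0, 0, 0]]

-- eye[row][col] = 1  (row, col always in range here, coming from range(8))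
def pvSet1 (eye : List (List Int)) (row col : Int) : List (List Int) :=
  PySem.List.pySetD eye row (PySem.List.pySetD (PySem.List.pyGetD eye row []) col 1)

def eye_with_position (x : Int) (y : Int) : List (List Int) :=
  (PySem.List.pyRange 0 8 1).foldl (fun eye row =>
    if row = y ∨ row = y + 4 then
      (PySem.List.pyRange 0 8 1).foldl (fun eye col =>
        if x < col ∧ col < x + 4 then pvSet1 eye row col else eye) eye
    else if y < row ∧ row < y + 4 then
      (PySem.List.pyRange 0 8 1).foldl (fun eye col =>
        if x ≤ col ∧ col ≤ x + 4 then pvSet1 eye row col else eye) eye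
    else eye) pvZeros8

-- ===== PORT B =====
-- the fixed offset table of B (module-level OFFSETS in Source B)
def pvOffsets : List (Int × Int) :=
  [(0, 1), (0, 2), (0, 3),
   (1, 0), (1, 1), (1, 2), (1, 3), (1, 4),
   (2, 0), (2, 1), (2, 2), (2, 3), (2, 4),
   (3, 0), (3, 1), (3, 2), (3, 3), (3, 4),
   (4, 1), (4, 2), (4, 3)]

def eye_with_position_alt (x : Int) (y : Int) : List (List Int) :=
  pvOffsets.foldl (fun eye p =>
    let r := y + p.1
    let c := x + p.2
    if 0 ≤ r ∧ r < 8 ∧ 0 ≤ c ∧ c < 8 then pvSet1 eye r c else eye) pvZeros8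

-- ===== PRECONDITION & SPEC =====
def Spec_eye_with_position (x : Int) (y : Int) (out : List (List Int)) : Prop := out = eye_with_position_alt x y
instance (x : Int) (y : Int) (out : List (List Int)) : Decidable (Spec_eye_with_position x y out) := by unfold Spec_eye_with_position; infer_instance

-- ===== CLAIM (what is proved, stated in full; the proofs are below) =====
def Claim_equal_eye_with_position : Prop := ∀ (x : Int) (y : Int), Dom_eye_with_position x y → Spec_eye_with_position x y (eye_with_position x y)

-- ===== LEMMAS AND PROOFS =====

-- B sets nothing when the eye lies fully off-grid
lemma pvAltOut (x y : Int) (h : x ≤ -5 ∨ 8 ≤ x ∨ y ≤ -5 ∨ 8 ≤ y) :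
    eye_with_position_alt x y = pvZeros8 := by
  unfold eye_with_position_alt
  rw [PySem.List.foldl_congr_mem' _ _ (fun eye _ => eye) _
      (by intro p hp acc
          have hb : 0 ≤ p.1 ∧ p.1 ≤ 4 ∧ 0 ≤ p.2 ∧ p.2 ≤ 4 := by
            fin_cases hp <;> simp
          simp only
          rw [if_neg (by omega)])]
  exact List.foldl_fixed _

-- A's 3-pixel inner column loop sets nothing when x is off-grid
lemma pvInner3Out (x : Int) (row : Int) (acc : List (List Int)) (hx : x ≤ -5 ∨ 8 ≤ x) :
    (PySem.List.pyRange 0 8 1).foldl (fun eye col =>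
        if x < col ∧ col < x + 4 then pvSet1 eye row col else eye) acc = acc := by
  rw [PySem.List.foldl_congr_mem' _ _ (fun eye _ => eye) _
      (by intro col hc acc'
          have := PySem.List.mem_pyRange_one.mp hc
          simp only
          rw [if_neg (by omega)])]
  exact List.foldl_fixed _

-- A's 5-pixel inner column loop sets nothing when x is off-grid
lemma pvInner5Out (x : Int) (row : Int) (acc : List (List Int)) (hx : x ≤ -5 ∨ 8 ≤ x) :
    (PySem.List.pyRange 0 8 1).foldl (fun eye col =>
        if x ≤ col ∧ col ≤ x + 4 then pvSet1 eye row col else eye) acc = acc := by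
  rw [PySem.List.foldl_congr_mem' _ _ (fun eye _ => eye) _
      (by intro col hc acc'
          have := PySem.List.mem_pyRange_one.mp hc
          simp only
          rw [if_neg (by omega)])]
  exact List.foldl_fixed _

-- A sets nothing when the eye lies fully off-grid
lemma pvAOut (x y : Int) (h : x ≤ -5 ∨ 8 ≤ x ∨ y ≤ -5 ∨ 8 ≤ y) :
    eye_with_position x y = pvZeros8 := by
  unfold eye_with_position
  rw [PySem.List.foldl_congr_mem' _ _ (fun eye _ => eye) _
      (by intro row hr acc
          have hrow := PySem.List.mem_pyRange_one.mp hr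
          simp only
          by_cases hx : x ≤ -5 ∨ 8 ≤ x
          · split_ifs with h1 h2
            · exact pvInner3Out x row acc hx
            · exact pvInner5Out x row acc hx
            · rfl
          · rw [if_neg (by omega), if_neg (by omega)])]
  exact List.foldl_fixed _

-- ===== VERDICT (by name: the statement is the Claim_ definition above) =====
set_option maxRecDepth 4000 in
theorem eye_with_position_spec : Claim_equal_eye_with_position := by
  intro x y _
  unfold Spec_eye_with_position
  by_cases hx : -4 ≤ x ∧ x ≤ 7
  · by_cases hy : -4 ≤ y ∧ y ≤ 7
    · obtain ⟨hx1, hx2⟩ := hx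
      obtain ⟨hy1, hy2⟩ := hy
      interval_cases x <;> interval_cases y <;> decide
    · rw [pvAOut x y (by omega), pvAltOut x y (by omega)]
  · rw [pvAOut x y (by omega), pvAltOut x y (by omega)]
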